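-- pv_equiv track=rewrite | github.com/enfmarinho/LSystem | src/LSystem.py | check
-- ===== SOURCE A (Python) =====
-- def check(axiom, string, rules, n_iterations):
--     stack = []
--     stack.extend(reversed(axiom))
--
--     nodes_heights = []
--     for count in range(len(stack)):
--         nodes_heights.append(0)
--
--     max_height_reached = 0
--     string_idx = 0
--     while stack:
--         top = stack.pop()
--         top_height = nodes_heights.pop()
--
--         if top in rules and top_height < n_iterations:
--             stack.extend(reversed(rules[top]))
--             for count in range(len(rules[top])):
--                 nodes_heights.append(top_height + 1)
--             max_height_reached = max(max_height_reached, top_height + 1)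
--         elif top == string[string_idx]:
--             string_idx += 1
--         else:
--             return False
--
--     # Check if got to the asked tree height and to the end of the string
--     return (
--         max_height_reached == n_iterations or all_constants(string, rules)
--     ) and string_idx == len(string)
--
-- def all_constants(string, rules):
--     for variable in string:
--         if variable in rules:
--             return False
--
--     return True
-- ===== SOURCE B (Python) =====
-- def check(axiom, string, rules, n_iterations):
--     idx = 0
--
--     def expand(seq, depth):
--         nonlocal idx
--         for symbol in seq:
--             if symbol in rules and depth < n_iterations:
--                 if not expand(rules[symbol], depth + 1):
--                     return False
--             else:
--                 if symbol != string[idx]: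
--                     return False
--                 idx += 1
--         return True
--
--     return expand(axiom, 0) and idx == len(string)
-- ===== Notes on version B (the rewrite author's own statement) =====
-- stated objective: simpler
-- what changed: A runs an explicit stack automaton with a parallel heights list plus a max-height-reached/all-constants post-check; B is a plain recursive descent over the expansion tree sharing one string index, dropping the heights ledger and the max-height bookkeeping entirely.
-- intended difference: When n_iterations < 0 and string equals the axiom but contains a symbol that has a rule, A returns False (its max_height_reached == n_iterations or all_constants clause misfires) while B returns True; B's value is intended since with no iterations the expansion is the axiom itself and string matches it exactly. — e.g. on check("A", "A", [("A", "AB")], -1): A returns false, B returns true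
import Mathlib
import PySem

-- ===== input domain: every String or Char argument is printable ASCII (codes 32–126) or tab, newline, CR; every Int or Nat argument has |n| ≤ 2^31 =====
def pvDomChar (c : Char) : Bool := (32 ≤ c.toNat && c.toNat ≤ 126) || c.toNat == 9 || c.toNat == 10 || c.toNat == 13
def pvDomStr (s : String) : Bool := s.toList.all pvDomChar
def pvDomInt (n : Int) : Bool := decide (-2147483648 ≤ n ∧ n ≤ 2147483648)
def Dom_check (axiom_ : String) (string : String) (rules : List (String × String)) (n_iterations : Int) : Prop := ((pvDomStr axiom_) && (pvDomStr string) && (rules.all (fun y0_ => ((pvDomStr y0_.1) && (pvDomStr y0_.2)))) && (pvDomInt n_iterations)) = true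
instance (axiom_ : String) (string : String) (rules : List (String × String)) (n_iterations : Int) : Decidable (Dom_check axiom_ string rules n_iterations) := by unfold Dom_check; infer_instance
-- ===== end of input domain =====

-- B replaces A's explicit stack automaton (with its parallel heights ledger and max-height/all-constants post-check)
-- by a plain recursive descent over the expansion tree sharing one string index; objective: simpler.
-- Equivalence is about return values; neither version mutates its arguments observably.

-- ===== PORT A =====
-- 'top in rules' (rules is a dict with string keys; top is a 1-char string)
def pvKeyA (rules : List (String × String)) (c : Char) : Bool :=
  (rules.find? (fun p => p.1 == String.singleton c)).isSome

-- 'rules[top]' (only evaluated when top in rules)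
def pvProdA (rules : List (String × String)) (c : Char) : List Char :=
  (((rules.find? (fun p => p.1 == String.singleton c)).map (fun p => p.2)).getD "").toList

-- port of all_constants (loop with early return False)
def pvAllConstants (rules : List (String × String)) : List Char → Bool
  | [] => true
  | c :: t => if pvKeyA rules c then false else pvAllConstants rules t

theorem pvDecDepth (n d : Int) (h : d < n) : (n - (d + 1)).toNat < (n - d).toNat := by omega

-- termination measure for A's while loop: size of the depth-capped expansion tree below (c, h)
def pvTsize (rules : List (String × String)) (n : Int) (c : Char) (h : Int) : Nat :=
  if hc : pvKeyA rules c = true ∧ h < n then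
    1 + ((pvProdA rules c).map (fun c' => pvTsize rules n c' (h + 1))).sum
  else 1
termination_by (n - h).toNat
decreasing_by exact pvDecDepth n h hc.2

theorem pvTsize_pos (rules : List (String × String)) (n : Int) (c : Char) (h : Int) :
    0 < pvTsize rules n c h := by
  rw [pvTsize]; split
  · exact Nat.lt_of_lt_of_le Nat.one_pos (Nat.le_add_right 1 _)
  · exact Nat.one_pos

def pvMeasureA (rules : List (String × String)) (n : Int) (st : List (Char × Int)) : Nat :=
  (st.map (fun p => pvTsize rules n p.1 p.2)).sum

theorem pvMeasureA_expand (rules : List (String × String)) (n : Int) (c : Char) (h : Int)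
    (rest : List (Char × Int)) (hk : pvKeyA rules c = true) (hh : h < n) :
    pvMeasureA rules n ((pvProdA rules c).map (fun c' => (c', h + 1)) ++ rest)
      < pvMeasureA rules n ((c, h) :: rest) := by
  simp only [pvMeasureA, List.map_append, List.map_map, List.sum_append, List.map_cons,
    List.sum_cons]
  rw [pvTsize, dif_pos ⟨hk, hh⟩]
  simp only [Function.comp_def]
  omega

theorem pvMeasureA_pop (rules : List (String × String)) (n : Int) (c : Char) (h : Int)
    (rest : List (Char × Int)) :
    pvMeasureA rules n rest < pvMeasureA rules n ((c, h) :: rest) := by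
  have := pvTsize_pos rules n c h
  simp only [pvMeasureA, List.map_cons, List.sum_cons]
  omega

-- the while loop: st pairs A's stack with nodes_heights (popped/pushed in lockstep), i = string_idx, m = max_height_reached
def pvLoopA (rules : List (String × String)) (n : Int) (s : String)
    (st : List (Char × Int)) (i : Nat) (m : Int) : Bool :=
  match st with
  | [] => (decide (m = n) || pvAllConstants rules s.toList) && decide (i = s.toList.length)
  | (c, h) :: rest =>
    if hc : pvKeyA rules c = true ∧ h < n then
      pvLoopA rules n s ((pvProdA rules c).map (fun c' => (c', h + 1)) ++ rest) i (max m (h + 1))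
    else
      match PySem.Str.pyGet? s (i : Int) with   -- string[string_idx]; none = IndexError, excluded by Pre_
      | some ch => if c = ch then pvLoopA rules n s rest (i + 1) m else false
      | none => false
termination_by pvMeasureA rules n st
decreasing_by
  · exact pvMeasureA_expand rules n c h rest hc.1 hc.2
  · exact pvMeasureA_pop rules n c h rest

def check (axiom_ : String) (string : String) (rules : List (String × String)) (n_iterations : Int) : Bool :=
  pvLoopA rules n_iterations string (axiom_.toList.map (fun c => (c, 0))) 0 0

-- ===== PORT B =====
def pvKeyB (rules : List (String × String)) (c : Char) : Bool :=
  (rules.find? (fun p => p.1 == String.singleton c)).isSome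

def pvProdB (rules : List (String × String)) (c : Char) : List Char :=
  (((rules.find? (fun p => p.1 == String.singleton c)).map (fun p => p.2)).getD "").toList

-- expand(seq, depth) with the shared index threaded through: some i' = success (idx advanced), none = failure
def pvSeqB (rules : List (String × String)) (n : Int) (s : String)
    (l : List Char) (d : Int) (i : Nat) : Option Nat :=
  match l with
  | [] => some i
  | c :: t =>
    if hc : pvKeyB rules c = true ∧ d < n then
      match pvSeqB rules n s (pvProdB rules c) (d + 1) i with
      | some i' => pvSeqB rules n s t d i'
      | none => none
    else
      match PySem.Str.pyGet? s (i : Int) with   -- string[idx]; none = IndexError, excluded by Pre_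
      | some ch => if c = ch then pvSeqB rules n s t d (i + 1) else none
      | none => none
termination_by ((n - d).toNat, l.length)
decreasing_by
  · exact Prod.Lex.left _ _ (pvDecDepth n d hc.2)
  · exact Prod.Lex.right _ (Nat.lt_succ_self _)
  · exact Prod.Lex.right _ (Nat.lt_succ_self _)

def check_alt (axiom_ : String) (string : String) (rules : List (String × String)) (n_iterations : Int) : Bool :=
  match pvSeqB rules n_iterations string axiom_.toList 0 0 with
  | some i => decide (i = string.toList.length)
  | none => false

-- ===== PRECONDITION & SPEC =====
-- one parallel substitution step of the L-system
def pvSubstStep (rules : List (String × String)) (l : List Char) : List Char :=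
  l.flatMap (fun c =>
    match rules.find? (fun p => p.1 == String.singleton c) with
    | some p => p.2.toList
    | none => [c])

def pvHasKey (rules : List (String × String)) (l : List Char) : Bool :=
  l.any (fun c => rules.any (fun p => p.1 == String.singleton c))

def pvExpandIter (rules : List (String × String)) : Nat → List Char → List Char
  | 0, l => l
  | k + 1, l => if pvHasKey rules l then pvExpandIter rules k (pvSubstStep rules l) else l

def pvExpansion (axiom_ : String) (rules : List (String × String)) (n : Int) : List Char :=
  pvExpandIter rules n.toNat axiom_.toList

-- Pre_check excludes exactly the inputs on which A raises IndexError: those where `string`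
-- is a proper prefix of the n-iteration expansion of the axiom (B raises there too).
def Pre_check (axiom_ : String) (string : String) (rules : List (String × String)) (n_iterations : Int) : Prop :=
  ¬ (string.toList <+: pvExpansion axiom_ rules n_iterations ∧
     string.toList.length < (pvExpansion axiom_ rules n_iterations).length)
instance (axiom_ : String) (string : String) (rules : List (String × String)) (n_iterations : Int) : Decidable (Pre_check axiom_ string rules n_iterations) := by unfold Pre_check; infer_instance

def pvWitness_check : String × String × (List (String × String)) × Int := ("A", "B", [("A", "B")], 1)

-- When n_iterations < 0 and string equals the axiom but contains a symbol that has a rule, A returns False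
-- (its max-height/all-constants clause misfires) while B returns True; B's value is intended, since with no
-- iterations the expansion is the axiom itself and string equals it exactly.
def D_check (axiom_ : String) (string : String) (rules : List (String × String)) (n_iterations : Int) : Prop :=
  n_iterations < 0 ∧ string = axiom_ ∧ string.toList.any (fun c => (rules.map Prod.fst).contains (String.singleton c)) = true
instance (axiom_ : String) (string : String) (rules : List (String × String)) (n_iterations : Int) : Decidable (D_check axiom_ string rules n_iterations) := by unfold D_check; infer_instance

def Spec_check (axiom_ : String) (string : String) (rules : List (String × String)) (n_iterations : Int) (out : Bool) : Prop := ¬ D_check axiom_ string rules n_iterations → out = check_alt axiom_ string rules n_iterations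
instance (axiom_ : String) (string : String) (rules : List (String × String)) (n_iterations : Int) (out : Bool) : Decidable (Spec_check axiom_ string rules n_iterations out) := by unfold Spec_check; infer_instance

def pvDiffWitness_check : String × String × (List (String × String)) × Int := ("A", "A", [("A", "AB")], -1)
def pvDiffWitnessOut_check : Bool × Bool := (false, true)

-- ===== CLAIM (what is proved, stated in full; the proofs are below) =====
def Claim_unchanged_check : Prop := ∀ (axiom_ : String) (string : String) (rules : List (String × String)) (n_iterations : Int), Dom_check axiom_ string rules n_iterations → Pre_check axiom_ string rules n_iterations → Spec_check axiom_ string rules n_iterations (check axiom_ string rules n_iterations)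
def Claim_changed_check : Prop := Dom_check (pvDiffWitness_check.1) (pvDiffWitness_check.2.1) (pvDiffWitness_check.2.2.1) (pvDiffWitness_check.2.2.2) ∧ Pre_check (pvDiffWitness_check.1) (pvDiffWitness_check.2.1) (pvDiffWitness_check.2.2.1) (pvDiffWitness_check.2.2.2) ∧ D_check (pvDiffWitness_check.1) (pvDiffWitness_check.2.1) (pvDiffWitness_check.2.2.1) (pvDiffWitness_check.2.2.2) ∧ check (pvDiffWitness_check.1) (pvDiffWitness_check.2.1) (pvDiffWitness_check.2.2.1) (pvDiffWitness_check.2.2.2) = pvDiffWitnessOut_check.1 ∧ check_alt (pvDiffWitness_check.1) (pvDiffWitness_check.2.1) (pvDiffWitness_check.2.2.1) (pvDiffWitness_check.2.2.2) = pvDiffWitnessOut_check.2 ∧ pvDiffWitnessOut_check.1 ≠ pvDiffWitnessOut_check.2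
def Claim_exact_check : Prop := ∀ (axiom_ : String) (string : String) (rules : List (String × String)) (n_iterations : Int), Dom_check axiom_ string rules n_iterations → Pre_check axiom_ string rules n_iterations → D_check axiom_ string rules n_iterations → check axiom_ string rules n_iterations ≠ check_alt axiom_ string rules n_iterations

-- ===== LEMMAS AND PROOFS =====

-- B's production helper coincides with A's (same dict lookup)
theorem pvProdB_eq (rules : List (String × String)) (c : Char) : pvProdB rules c = pvProdA rules c := rfl

-- the matching part of A's loop, with the max-height bookkeeping stripped
def pvSFold (rules : List (String × String)) (n : Int) (s : String)
    (st : List (Char × Int)) (i : Nat) : Option Nat :=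
  match st with
  | [] => some i
  | (c, h) :: rest =>
    if hc : pvKeyA rules c = true ∧ h < n then
      pvSFold rules n s ((pvProdA rules c).map (fun c' => (c', h + 1)) ++ rest) i
    else
      match PySem.Str.pyGet? s (i : Int) with
      | some ch => if c = ch then pvSFold rules n s rest (i + 1) else none
      | none => none
termination_by pvMeasureA rules n st
decreasing_by
  · exact pvMeasureA_expand rules n c h rest hc.1 hc.2
  · exact pvMeasureA_pop rules n c h rest

-- the max-height bookkeeping of A's loop, on its own
def pvHFold (rules : List (String × String)) (n : Int)
    (st : List (Char × Int)) (m : Int) : Int :=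
  match st with
  | [] => m
  | (c, h) :: rest =>
    if hc : pvKeyA rules c = true ∧ h < n then
      pvHFold rules n ((pvProdA rules c).map (fun c' => (c', h + 1)) ++ rest) (max m (h + 1))
    else
      pvHFold rules n rest m
termination_by pvMeasureA rules n st
decreasing_by
  · exact pvMeasureA_expand rules n c h rest hc.1 hc.2
  · exact pvMeasureA_pop rules n c h rest

-- branch equations
theorem pvSFold_nil (rules : List (String × String)) (n : Int) (s : String) (i : Nat) :
    pvSFold rules n s [] i = some i := by rw [pvSFold.eq_def]

theorem pvSFold_pos (rules : List (String × String)) (n : Int) (s : String) (c : Char) (h : Int)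
    (rest : List (Char × Int)) (i : Nat) (hc : pvKeyA rules c = true ∧ h < n) :
    pvSFold rules n s ((c, h) :: rest) i
      = pvSFold rules n s ((pvProdA rules c).map (fun c' => (c', h + 1)) ++ rest) i := by
  rw [pvSFold.eq_def]; exact dif_pos hc

theorem pvSFold_some (rules : List (String × String)) (n : Int) (s : String) (c ch : Char) (h : Int)
    (rest : List (Char × Int)) (i : Nat) (hc : ¬ (pvKeyA rules c = true ∧ h < n))
    (hget : PySem.Str.pyGet? s (i : Int) = some ch) :
    pvSFold rules n s ((c, h) :: rest) i
      = if c = ch then pvSFold rules n s rest (i + 1) else none := by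
  rw [pvSFold.eq_def]; exact (dif_neg hc).trans (by rw [hget])

theorem pvSFold_none (rules : List (String × String)) (n : Int) (s : String) (c : Char) (h : Int)
    (rest : List (Char × Int)) (i : Nat) (hc : ¬ (pvKeyA rules c = true ∧ h < n))
    (hget : PySem.Str.pyGet? s (i : Int) = none) :
    pvSFold rules n s ((c, h) :: rest) i = none := by
  rw [pvSFold.eq_def]; exact (dif_neg hc).trans (by rw [hget])

theorem pvHFold_nil (rules : List (String × String)) (n : Int) (m : Int) :
    pvHFold rules n [] m = m := by rw [pvHFold.eq_def]

theorem pvHFold_pos (rules : List (String × String)) (n : Int) (c : Char) (h : Int)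
    (rest : List (Char × Int)) (m : Int) (hc : pvKeyA rules c = true ∧ h < n) :
    pvHFold rules n ((c, h) :: rest) m
      = pvHFold rules n ((pvProdA rules c).map (fun c' => (c', h + 1)) ++ rest) (max m (h + 1)) := by
  rw [pvHFold.eq_def]; exact dif_pos hc

theorem pvHFold_neg (rules : List (String × String)) (n : Int) (c : Char) (h : Int)
    (rest : List (Char × Int)) (m : Int) (hc : ¬ (pvKeyA rules c = true ∧ h < n)) :
    pvHFold rules n ((c, h) :: rest) m = pvHFold rules n rest m := by
  rw [pvHFold.eq_def]; exact dif_neg hc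

-- A's loop, decomposed: matching and max-height tracking are independent
theorem pvLoopA_eq (rules : List (String × String)) (n : Int) (s : String)
    (st : List (Char × Int)) (i : Nat) (m : Int) :
    pvLoopA rules n s st i m =
      match pvSFold rules n s st i with
      | none => false
      | some i' => (decide (pvHFold rules n st m = n) || pvAllConstants rules s.toList)
                    && decide (i' = s.toList.length) := by
  fun_induction pvLoopA rules n s st i m with
  | case1 i m => rw [pvSFold_nil, pvHFold_nil]
  | case2 i m c h rest hc ih => rw [ih, pvSFold_pos rules n s c h rest i hc, pvHFold_pos rules n c h rest m hc]
  | case3 i m h rest ch hget hc ih =>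
    rw [ih, pvSFold_some rules n s ch ch h rest i hc hget, if_pos rfl, pvHFold_neg rules n ch h rest m hc]
  | case4 i m c h rest hc ch hget hne => rw [pvSFold_some rules n s c ch h rest i hc hget, if_neg hne]
  | case5 i m c h rest hc hget => rw [pvSFold_none rules n s c h rest i hc hget]

-- a stack segment of constant height d matches exactly as B's expand(l, d) does
theorem pvSFold_eq_seqB (rules : List (String × String)) (n : Int) (s : String)
    (l : List Char) (d : Int) (i : Nat) :
    ∀ rest, pvSFold rules n s (l.map (fun c => (c, d)) ++ rest) i
      = (pvSeqB rules n s l d i).bind (fun i' => pvSFold rules n s rest i') := by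
  fun_induction pvSeqB rules n s l d i with
  | case1 d i => intro rest; simp
  | case2 d i c t hc i' hrec ihI ihT =>
    intro rest
    simp only [List.map_cons, List.cons_append]
    rw [pvSFold_pos rules n s c d _ i hc, ← pvProdB_eq rules c,
      ihI (t.map (fun c => (c, d)) ++ rest), hrec]
    simp only [Option.bind_some]
    exact ihT rest
  | case3 d i c t hc hrec ihI =>
    intro rest
    simp only [List.map_cons, List.cons_append]
    rw [pvSFold_pos rules n s c d _ i hc, ← pvProdB_eq rules c,
      ihI (t.map (fun c => (c, d)) ++ rest), hrec]
    rfl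
  | case4 d i t ch hget hc ihT =>
    intro rest
    simp only [List.map_cons, List.cons_append]
    rw [pvSFold_some rules n s ch ch d _ i hc hget, if_pos rfl]
    exact ihT rest
  | case5 d i c t hc ch hget hne =>
    intro rest
    simp only [List.map_cons, List.cons_append]
    rw [pvSFold_some rules n s c ch d _ i hc hget, if_neg hne]
    rfl
  | case6 d i c t hc hget =>
    intro rest
    simp only [List.map_cons, List.cons_append]
    rw [pvSFold_none rules n s c d _ i hc hget]
    rfl

theorem pvHFold_mono (rules : List (String × String)) (n : Int)
    (st : List (Char × Int)) (m : Int) : m ≤ pvHFold rules n st m := by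
  fun_induction pvHFold rules n st m with
  | case1 m => exact le_refl _
  | case2 m c h rest hc ih => exact le_trans (le_max_left _ _) ih
  | case3 m c h rest hc ih => exact ih

theorem pvHFold_le (rules : List (String × String)) (n : Int)
    (st : List (Char × Int)) (m : Int) :
    (∀ p ∈ st, p.2 ≤ n) → pvHFold rules n st m ≤ max m n := by
  fun_induction pvHFold rules n st m with
  | case1 m => intro _; exact le_max_left _ _
  | case2 m c h rest hc ih =>
    intro hh
    have h1 : h + 1 ≤ n := hc.2
    have h2 : pvHFold rules n ((pvProdA rules c).map (fun c' => (c', h + 1)) ++ rest) (max m (h + 1))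
        ≤ max (max m (h + 1)) n := by
      apply ih
      intro p hp
      rcases List.mem_append.mp hp with hp | hp
      · rcases List.mem_map.mp hp with ⟨c', _, rfl⟩; exact h1
      · exact hh p (List.mem_cons_of_mem _ hp)
    omega
  | case3 m c h rest hc ih =>
    intro hh
    exact ih (fun p hp => hh p (List.mem_cons_of_mem _ hp))

theorem pvHFold_noexp (rules : List (String × String)) (n : Int) (hn : n < 0) :
    ∀ st, (∀ p ∈ st, 0 ≤ p.2) → ∀ m, pvHFold rules n st m = m := by
  intro st
  induction st with
  | nil => intro _ m; exact pvHFold_nil rules n m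
  | cons p rest ih =>
    intro hp m
    obtain ⟨c, h⟩ := p
    have h0 : 0 ≤ h := hp (c, h) List.mem_cons_self
    have hne : ¬ (pvKeyA rules c = true ∧ h < n) := by rintro ⟨_, hlt⟩; omega
    rw [pvHFold_neg rules n c h rest m hne]
    exact ih (fun q hq => hp q (List.mem_cons_of_mem _ hq)) m

-- with n < 0 no expansion ever fires: the loop just matches the stack symbols against string
theorem pvSFold_noexp (rules : List (String × String)) (n : Int) (s : String) (hn : n < 0) :
    ∀ st i j, (∀ p ∈ st, 0 ≤ p.2) →
      (pvSFold rules n s st i = some j ↔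
        (j = i + st.length ∧ st.map Prod.fst <+: s.toList.drop i)) := by
  intro st
  induction st with
  | nil =>
    intro i j _
    rw [pvSFold_nil]
    simp [eq_comm]
  | cons p rest ih =>
    intro i j hp
    obtain ⟨c, h⟩ := p
    have h0 : 0 ≤ h := hp (c, h) List.mem_cons_self
    have hne : ¬ (pvKeyA rules c = true ∧ h < n) := by rintro ⟨_, hlt⟩; omega
    have hrest : ∀ q ∈ rest, 0 ≤ q.2 := fun q hq => hp q (List.mem_cons_of_mem _ hq)
    rcases hi : s.toList[i]? with _ | ch
    · have hlen : s.toList.length ≤ i := by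
        by_contra hcon
        rw [List.getElem?_eq_getElem (by omega)] at hi
        simp at hi
      rw [pvSFold_none rules n s c h rest i hne (by rw [PySem.Str.pyGet?_natCast, hi])]
      have hdnil : s.toList.drop i = [] := List.drop_eq_nil_of_le hlen
      simp [hdnil]
    · rw [pvSFold_some rules n s c ch h rest i hne (by rw [PySem.Str.pyGet?_natCast, hi])]
      have hilt : i < s.toList.length := (List.getElem?_eq_some_iff.mp hi).1
      have hdrop : s.toList.drop i = ch :: s.toList.drop (i + 1) := by
        rw [List.drop_eq_getElem_cons hilt, (List.getElem?_eq_some_iff.mp hi).2]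
      by_cases hch : c = ch
      · rw [if_pos hch, ih (i + 1) j hrest, hdrop, hch]
        simp only [List.map_cons, List.cons_prefix_cons, List.length_cons, true_and]
        constructor
        · rintro ⟨h1, h2⟩; exact ⟨by omega, h2⟩
        · rintro ⟨h1, h2⟩; exact ⟨by omega, h2⟩
      · simp only [if_neg hch, hdrop, List.map_cons, List.cons_prefix_cons]
        constructor
        · rintro hcon; cases hcon
        · rintro ⟨_, hcc, _⟩; exact absurd hcc hch

-- if the successful match consumed a position holding a rule symbol, the loop's maximum height
-- reaches n (or one of the stack entries itself already sits at height n)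
theorem pvGK (rules : List (String × String)) (n : Int) (s : String)
    (st : List (Char × Int)) (i : Nat) :
    ∀ m j, (∀ p ∈ st, p.2 ≤ n) → pvSFold rules n s st i = some j →
      ∀ p c', i ≤ p → p < j → s.toList[p]? = some c' → pvKeyA rules c' = true →
      n ≤ pvHFold rules n st m ∨ ∃ q ∈ st, q.2 = n := by
  fun_induction pvSFold rules n s st i with
  | case1 i =>
    intro m j _ hj p c' hip hpj _ _
    simp only [Option.some.injEq] at hj
    omega
  | case2 i c h rest hc ih =>
    intro m j hh hj p c' hip hpj hp hkey
    have hh' : ∀ q ∈ (pvProdA rules c).map (fun c' => (c', h + 1)) ++ rest, q.2 ≤ n := by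
      intro q hq
      rcases List.mem_append.mp hq with hq | hq
      · rcases List.mem_map.mp hq with ⟨c'', _, rfl⟩; exact hc.2
      · exact hh q (List.mem_cons_of_mem _ hq)
    rcases ih (max m (h + 1)) j hh' hj p c' hip hpj hp hkey with hl | ⟨q, hq, hqn⟩
    · left; rw [pvHFold_pos rules n c h rest m hc]; exact hl
    · rcases List.mem_append.mp hq with hq | hq
      · rcases List.mem_map.mp hq with ⟨c'', _, rfl⟩
        left
        rw [pvHFold_pos rules n c h rest m hc]
        simp only at hqn
        calc n = h + 1 := hqn.symm
        _ ≤ max m (h + 1) := le_max_right _ _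
        _ ≤ _ := pvHFold_mono _ _ _ _
      · right; exact ⟨q, List.mem_cons_of_mem _ hq, hqn⟩
  | case3 i h rest ch hget hc ih =>
    intro m j hh hj p c' hip hpj hp hkey
    rw [PySem.Str.pyGet?_natCast] at hget
    by_cases hpi : p = i
    · subst hpi
      rw [hget] at hp
      injection hp with hp
      right
      refine ⟨(ch, h), List.mem_cons_self, ?_⟩
      have hkc : pvKeyA rules ch = true := by rw [hp]; exact hkey
      have h1 : ¬ h < n := fun hlt => hc ⟨hkc, hlt⟩
      have h2 : h ≤ n := hh (ch, h) List.mem_cons_self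
      simp only at h2 ⊢
      omega
    · rcases ih m j (fun q hq => hh q (List.mem_cons_of_mem _ hq)) hj p c'
        (by omega) hpj hp hkey with hl | ⟨q, hq, hqn⟩
      · left; rw [pvHFold_neg rules n ch h rest m hc]; exact hl
      · right; exact ⟨q, List.mem_cons_of_mem _ hq, hqn⟩
  | case4 i c h rest hc ch hget hne =>
    intro m j _ hj
    cases hj
  | case5 i c h rest hc hget =>
    intro m j _ hj
    cases hj

theorem pvKeyA_eq_any (rules : List (String × String)) (c : Char) :
    pvKeyA rules c = rules.any (fun p => p.1 == String.singleton c) := by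
  induction rules with
  | nil => rfl
  | cons r t ih =>
    by_cases hr : (r.1 == String.singleton c) = true
    · simp [pvKeyA, hr]
    · simp only [pvKeyA] at ih ⊢
      rw [List.find?_cons_of_neg (by simpa using hr), List.any_cons, ih]
      simp [hr]

theorem pvAllConstants_eq (rules : List (String × String)) :
    ∀ l, pvAllConstants rules l = !pvHasKey rules l := by
  intro l
  induction l with
  | nil => simp [pvAllConstants, pvHasKey]
  | cons c t ih =>
    rw [pvAllConstants]
    by_cases hk : pvKeyA rules c
    · rw [if_pos hk]
      rw [pvKeyA_eq_any] at hk
      have hh : pvHasKey rules (c :: t) = true := by simp [pvHasKey, List.any_cons, hk]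
      simp [hh]
    · rw [if_neg hk, ih]
      rw [pvKeyA_eq_any] at hk
      simp only [pvHasKey, List.any_cons, Bool.not_eq_true] at hk ⊢
      rw [hk]
      simp

theorem pvHasKey_eq (rules : List (String × String)) (l : List Char) :
    pvHasKey rules l = l.any (fun c => (rules.map Prod.fst).contains (String.singleton c)) := by
  rw [Bool.eq_iff_iff]
  simp only [pvHasKey, List.any_eq_true, List.contains_iff_mem, List.mem_map, beq_iff_eq]

theorem pvInitHeights (l : List Char) : ∀ p ∈ l.map (fun c => (c, (0 : Int))), p.2 = 0 := by
  intro p hp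
  rcases List.mem_map.mp hp with ⟨c, _, rfl⟩
  rfl

theorem pvInitFst (l : List Char) : (l.map (fun c => (c, (0 : Int)))).map Prod.fst = l := by
  simp [Function.comp_def]

theorem pvSFold_init (axiom_ string : String) (rules : List (String × String)) (n : Int) :
    pvSFold rules n string (axiom_.toList.map (fun c => (c, 0))) 0
      = pvSeqB rules n string axiom_.toList 0 0 := by
  have h0 : (axiom_.toList.map (fun c => (c, (0 : Int)))) =
      (axiom_.toList.map (fun c => (c, (0 : Int)))) ++ [] := by simp
  rw [h0, pvSFold_eq_seqB]
  rcases pvSeqB rules n string axiom_.toList 0 0 with _ | i'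
  · rfl
  · simp [pvSFold_nil]

-- the reduced form of port A
theorem check_eq (axiom_ string : String) (rules : List (String × String)) (n : Int) :
    check axiom_ string rules n =
      match pvSeqB rules n string axiom_.toList 0 0 with
      | none => false
      | some i' => (decide (pvHFold rules n (axiom_.toList.map (fun c => (c, 0))) 0 = n)
                      || pvAllConstants rules string.toList)
                    && decide (i' = string.toList.length) := by
  rw [check, pvLoopA_eq, pvSFold_init]

theorem pvDiffA : check "A" "A" [("A", "AB")] (-1) = false := by
  have hsf : pvSFold [("A", "AB")] (-1) "A" ("A".toList.map (fun c => (c, 0))) 0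
      = some "A".toList.length := by
    rw [pvSFold_noexp [("A", "AB")] (-1) "A" (by norm_num) _ 0 _ (by decide)]
    refine ⟨by simp, ?_⟩
    rw [pvInitFst, List.drop_zero]
  have hseq : pvSeqB [("A", "AB")] (-1) "A" "A".toList 0 0 = some "A".toList.length := by
    rw [← pvSFold_init, hsf]
  rw [check_eq, hseq]
  simp only [decide_true, Bool.and_true]
  rw [pvHFold_noexp [("A", "AB")] (-1) (by norm_num) _ (by decide) 0]
  decide

theorem pvDiffB : check_alt "A" "A" [("A", "AB")] (-1) = true := by
  have hsf : pvSFold [("A", "AB")] (-1) "A" ("A".toList.map (fun c => (c, 0))) 0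
      = some "A".toList.length := by
    rw [pvSFold_noexp [("A", "AB")] (-1) "A" (by norm_num) _ 0 _ (by decide)]
    refine ⟨by simp, ?_⟩
    rw [pvInitFst, List.drop_zero]
  have hseq : pvSeqB [("A", "AB")] (-1) "A" "A".toList 0 0 = some "A".toList.length := by
    rw [← pvSFold_init, hsf]
  rw [check_alt, hseq]
  simp


-- ===== VERDICT (by name: the statements are the Claim_ definitions above) =====
theorem check_spec : Claim_unchanged_check := by
  intro axiom_ string rules n _dom _pre
  unfold Spec_check
  intro hnD
  rw [check_eq, check_alt]
  rcases hseq : pvSeqB rules n string axiom_.toList 0 0 with _ | i'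
  · rfl
  · simp only
    by_cases hlen : i' = string.toList.length
    · subst hlen
      simp only [decide_true, Bool.and_true]
      by_cases hac : pvAllConstants rules string.toList
      · simp [hac]
      · rw [Bool.not_eq_true] at hac
        have hkey : pvHasKey rules string.toList = true := by
          have h1 := pvAllConstants_eq rules string.toList
          rw [hac] at h1
          simpa using h1.symm
        have hsf : pvSFold rules n string (axiom_.toList.map (fun c => (c, 0))) 0
            = some string.toList.length := by rw [pvSFold_init, hseq]
        rcases (by omega : n < 0 ∨ 0 ≤ n) with hn | hn
        · -- n < 0: then string = axiom_, so D_check holds — contradiction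
          exfalso
          have h2 := (pvSFold_noexp rules n string hn _ 0 string.toList.length
            (fun p hp => le_of_eq (pvInitHeights _ p hp).symm)).mp hsf
          rw [pvInitFst, List.drop_zero] at h2
          have hlen2 : axiom_.toList.length = string.toList.length := by
            have h3 := h2.1
            simp only [List.length_map] at h3
            omega
          have heq : axiom_.toList = string.toList := h2.2.eq_of_length hlen2
          exact hnD ⟨hn, String.toList_inj.mp heq.symm, by rw [← pvHasKey_eq]; exact hkey⟩
        · -- 0 ≤ n: the max-height clause is true
          have hub : pvHFold rules n (axiom_.toList.map (fun c => (c, 0))) 0 ≤ n := by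
            have h4 := pvHFold_le rules n (axiom_.toList.map (fun c => (c, 0))) 0
              (fun p hp => by rw [pvInitHeights _ p hp]; exact hn)
            omega
          have hlb : (0 : Int) ≤ pvHFold rules n (axiom_.toList.map (fun c => (c, 0))) 0 :=
            pvHFold_mono _ _ _ _
          rcases eq_or_lt_of_le hn with hn0 | hnpos
          · have h5 : pvHFold rules n (axiom_.toList.map (fun c => (c, 0))) 0 = n := by omega
            simp [h5]
          · -- 0 < n: use pvGK at a position of string holding a rule symbol
            have hex : ∃ c' ∈ string.toList, rules.any (fun p => p.1 == String.singleton c') := by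
              simpa [pvHasKey, List.any_eq_true] using hkey
            rcases hex with ⟨c', hc'mem, hc'key⟩
            rcases List.getElem_of_mem hc'mem with ⟨p, hplt, hpeq⟩
            rcases pvGK rules n string (axiom_.toList.map (fun c => (c, 0))) 0 0
              string.toList.length
              (fun q hq => by rw [pvInitHeights _ q hq]; exact hn) hsf p c'
              (Nat.zero_le _) hplt (by rw [List.getElem?_eq_getElem hplt, hpeq])
              (by rw [pvKeyA_eq_any]; exact hc'key) with hl | ⟨q, hq, hqn⟩
            · have h6 : pvHFold rules n (axiom_.toList.map (fun c => (c, 0))) 0 = n := by omega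
              simp [h6]
            · rw [pvInitHeights _ q hq] at hqn
              omega
    · rw [decide_eq_false hlen, Bool.and_false]

set_option maxRecDepth 4096 in
theorem check_changed : Claim_changed_check := by
  unfold Claim_changed_check
  exact ⟨by decide, by decide, by decide, pvDiffA, pvDiffB, by decide⟩

theorem check_tight : Claim_exact_check := by
  intro axiom_ string rules n _dom _pre hD
  obtain ⟨hn, heqs, hkeyE⟩ := hD
  subst heqs
  have hkey : pvHasKey rules string.toList = true := by rw [pvHasKey_eq]; exact hkeyE
  have hsf : pvSFold rules n string (string.toList.map (fun c => (c, 0))) 0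
      = some string.toList.length := by
    rw [pvSFold_noexp rules n string hn _ 0 string.toList.length
      (fun p hp => le_of_eq (pvInitHeights _ p hp).symm)]
    refine ⟨by simp, ?_⟩
    rw [pvInitFst, List.drop_zero]
  have hseq : pvSeqB rules n string string.toList 0 0 = some string.toList.length := by
    rw [← pvSFold_init, hsf]
  have hH : pvHFold rules n (string.toList.map (fun c => (c, 0))) 0 = 0 :=
    pvHFold_noexp rules n hn _ (fun p hp => le_of_eq (pvInitHeights _ p hp).symm) 0
  have hac : pvAllConstants rules string.toList = false := by
    rw [pvAllConstants_eq, hkey]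
    rfl
  rw [check_eq, check_alt, hseq]
  simp only [decide_true, Bool.and_true, hH, hac]
  simp only [Bool.or_false, ne_eq, decide_eq_true_eq]
  omega
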